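-- pv_equiv track=rewrite | github.com/pypi-data/pypi-mirror-379 | packages/edawishlist/edawishlist-0.0.24.tar.gz/edawishlist-0.0.24/edawishlist/utils.py | node_to_register
-- ===== SOURCE A (Python) =====
-- def lsb(n):
--     """
--     Computes the position of the least significant bit (LSB).
--     This is a fast, bitwise operation.
--     """
--     if n == 0:
--         return -1  # Or handle as an error, depending on requirements
--     return (n & -n).bit_length() - 1
--
-- def word_mask(width):
--     """
--     Creates a bitmask of a given width.
--     """
--     return (1 << width) - 1
--
-- def popcount(n):
--     """
--     Counts the number of set bits (1s) in a number.
--     """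
--     return n.bit_count() if hasattr(int, 'bit_count') else bin(n).count('1')
--
-- def node_to_register(value, address, mask, read_values, bus_width, logger):
--     """
--     Splits a node value into multiple register values.
--     """
--     bus_mask = word_mask(bus_width)
--     node_lsb = 0
--     write_values = []
--
--     # Correct and idiomatic way to iterate over reversed zip object.
--     for i, (addr, msk, rdvl) in enumerate(reversed(list(zip(address, mask, read_values)))):
--         # Use efficient helper functions for bit manipulation
--         word_width = popcount(msk)
--         node_word_mask = word_mask(word_width) << node_lsb
--         node_word_value = (value & node_word_mask) >> node_lsb
--         lsb_pos = lsb(msk)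
--
--         # Use efficient logging format
--         # logger.debug(
--         #     'Word width = %s, node_mask = 0x%x, node_word_value = %s, lsb = %s',
--         #     word_width, node_word_mask, node_word_value, lsb_pos
--         # )
--
--         bus_word_value = node_word_value << lsb_pos
--         word_to_keep = rdvl & (bus_mask - msk)
--         combined = bus_word_value | word_to_keep
--
--         # Use efficient logging format for the complex string,
--         # moving the f-string formatting logic outside the logger call.
--         debug_msg = (
--             'W:%s Combining word_to_keep:(0b%s, 0x%x, %s) to bus_word_value: '
--             '(0b%s, 0x%x, %s), resulting in combined: (0b%s, 0x%x, %s)'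
--         )
--         # logger.debug(
--         #     debug_msg,
--         #     i,
--         #     format(word_to_keep, f'0{bus_width}b'), word_to_keep, word_to_keep,
--         #     format(bus_word_value, f'0{bus_width}b'), bus_word_value, bus_word_value,
--         #     format(combined, f'0{bus_width}b'), combined, combined
--         # )
--
--         write_values.append(combined)
--         node_lsb += word_width
--     return write_values[::-1]
-- ===== SOURCE B (Python) =====
-- def lsb(n):
--     if n == 0:
--         return -1
--     return (n & -n).bit_length() - 1
--
--
-- def node_to_register(value, address, mask, read_values, bus_width, logger):
--     """
--     Splits a node value into per-register write values by divide and conquer: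
--     the triple list is halved; the right half peels its chunks off the low
--     bits of v (shifting v right as it consumes), then the left half continues
--     on the leftover value.  No cumulative offsets, no reversal.
--     """
--     bus_mask = (1 << bus_width) - 1
--
--     def go(triples, v):
--         # returns (write values for these triples, v shifted right by their total width)
--         if not triples:
--             return [], v
--         if len(triples) == 1:
--             _, m, r = triples[0]
--             w = m.bit_count()
--             chunk = v & ((1 << w) - 1)
--             out = (chunk << lsb(m)) | (r & (bus_mask - m))
--             return [out], v >> w
--         half = len(triples) // 2
--         right_vals, v = go(triples[half:], v)
--         left_vals, v = go(triples[:half], v)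
--         return left_vals + right_vals, v
--
--     vals, _ = go(list(zip(address, mask, read_values)), value)
--     return vals
-- ===== Notes on version B (the rewrite author's own statement) =====
-- stated objective: alternative
-- what changed: B replaces A's single reversed pass with a running node_lsb offset, masking value in place and a final [::-1] by a divide-and-conquer recursion that halves the triple list and consumes the value itself: each leaf peels its chunk off the low bits of v and shifts v right, the right half running before the left, so no offsets and no reversal exist.
-- outside the precondition, e.g. on node_to_register(5, [1], [0], [0], 8, None): A raises ValueError, B raises ValueError; on node_to_register(5, [1], [3], [0], -1, None): A raises ValueError, B raises ValueError
import Mathlib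
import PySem

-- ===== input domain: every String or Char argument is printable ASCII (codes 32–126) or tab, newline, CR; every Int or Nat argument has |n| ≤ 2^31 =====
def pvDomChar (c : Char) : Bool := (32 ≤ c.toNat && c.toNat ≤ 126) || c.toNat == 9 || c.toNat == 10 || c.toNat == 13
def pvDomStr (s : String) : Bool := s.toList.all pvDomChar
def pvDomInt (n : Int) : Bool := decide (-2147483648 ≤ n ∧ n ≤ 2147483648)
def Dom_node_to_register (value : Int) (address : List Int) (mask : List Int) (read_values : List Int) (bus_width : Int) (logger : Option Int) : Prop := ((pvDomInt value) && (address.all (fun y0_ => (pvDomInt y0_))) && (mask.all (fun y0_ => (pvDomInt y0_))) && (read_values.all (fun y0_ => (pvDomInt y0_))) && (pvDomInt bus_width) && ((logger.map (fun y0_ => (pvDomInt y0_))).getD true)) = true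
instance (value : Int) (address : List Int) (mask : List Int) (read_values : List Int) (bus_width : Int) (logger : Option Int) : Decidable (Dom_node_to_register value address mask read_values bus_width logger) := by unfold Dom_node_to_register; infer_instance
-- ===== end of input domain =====

-- B replaces A's reversed single pass with a running node_lsb and final [::-1] by a
-- divide-and-conquer recursion that halves the triple list and consumes the value itself
-- by shifting (objective: alternative decomposition, same asymptotic big-int cost).

-- ===== PORT A =====
-- helper lsb(n), shared by both ports (Source A and Source B define it identically); -1 for n = 0, as in Python
def pyLsb (n : Int) : Int :=
  if n = 0 then -1
  else (PySem.Int.bitLength (PySem.Int.band n (-n)) : Int) - 1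

-- literal port of A's loop: reversed zip, running node_lsb, append, final [::-1].
-- bus_width.toNat and (…).toNat on the lsb are exact on Pre_ (0 ≤ bus_width, masks ≠ 0);
-- on negative shift amounts Python raises ValueError and those inputs are excluded by Pre_.
def node_to_register (value : Int) (address : List Int) (mask : List Int) (read_values : List Int) (bus_width : Int) (logger : Option Int) : List Int :=
  let bus_mask : Int := ((1:Int) <<< bus_width.toNat) - 1
  let triples := (List.zip address (List.zip mask read_values)).reverse
  let res := triples.foldl (fun (st : Nat × List Int) (t : Int × Int × Int) =>
      let word_width := PySem.Int.bitCount t.2.1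
      let node_word_mask := (((1:Int) <<< word_width) - 1) <<< st.1
      let node_word_value := (PySem.Int.band value node_word_mask) >>> st.1
      let lsb_pos := pyLsb t.2.1
      let bus_word_value := node_word_value <<< lsb_pos.toNat
      let word_to_keep := PySem.Int.band t.2.2 (bus_mask - t.2.1)
      (st.1 + word_width, st.2 ++ [PySem.Int.bor bus_word_value word_to_keep]))
    (0, [])
  res.2.reverse

-- ===== PORT B =====
-- literal port of Source B's inner `go`: divide and conquer on the triple list, the right half
-- peels its chunks off the low bits of v (shifting v right), then the left half continues.
def ntrGo (bus_mask : Int) : List (Int × Int × Int) → Int → List Int × Int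
  | [], v => ([], v)
  | [t], v =>
      let w := PySem.Int.bitCount t.2.1
      let chunk := PySem.Int.band v (((1:Int) <<< w) - 1)
      let out := PySem.Int.bor (chunk <<< (pyLsb t.2.1).toNat) (PySem.Int.band t.2.2 (bus_mask - t.2.1))
      ([out], v >>> w)
  | t1 :: t2 :: rest, v =>
      let ts := t1 :: t2 :: rest
      let half := ts.length / 2
      let p1 := ntrGo bus_mask (ts.drop half) v
      let p2 := ntrGo bus_mask (ts.take half) p1.2
      (p2.1 ++ p1.1, p2.2)
  termination_by ts _ => ts.length
  decreasing_by
  · simp; omega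
  · simp; omega

def node_to_register_alt (value : Int) (address : List Int) (mask : List Int) (read_values : List Int) (bus_width : Int) (logger : Option Int) : List Int :=
  let bus_mask : Int := ((1:Int) <<< bus_width.toNat) - 1
  (ntrGo bus_mask (List.zip address (List.zip mask read_values)) value).1

-- ===== PRECONDITION & SPEC =====
-- Pre_ excludes exactly the inputs where A raises: bus_width < 0 (1 << bus_width is a
-- ValueError) and a zero mask among the zipped triples (lsb = -1, then << -1 is a ValueError).
def Pre_node_to_register (value : Int) (address : List Int) (mask : List Int) (read_values : List Int) (bus_width : Int) (logger : Option Int) : Prop :=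
  0 ≤ bus_width ∧ ∀ m ∈ mask.take (min address.length read_values.length), m ≠ 0
instance (value : Int) (address : List Int) (mask : List Int) (read_values : List Int) (bus_width : Int) (logger : Option Int) : Decidable (Pre_node_to_register value address mask read_values bus_width logger) := by unfold Pre_node_to_register; infer_instance

def pvWitness_node_to_register : Int × List Int × List Int × List Int × Int × Option Int :=
  (53, [1, 2], [3, 12], [0, 0], 8, none)

def Spec_node_to_register (value : Int) (address : List Int) (mask : List Int) (read_values : List Int) (bus_width : Int) (logger : Option Int) (out : List Int) : Prop := out = node_to_register_alt value address mask read_values bus_width logger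
instance (value : Int) (address : List Int) (mask : List Int) (read_values : List Int) (bus_width : Int) (logger : Option Int) (out : List Int) : Decidable (Spec_node_to_register value address mask read_values bus_width logger out) := by unfold Spec_node_to_register; infer_instance

-- ===== CLAIM (what is proved, stated in full; the proofs are below) =====
def Claim_equal_node_to_register : Prop := ∀ (value : Int) (address : List Int) (mask : List Int) (read_values : List Int) (bus_width : Int) (logger : Option Int), Dom_node_to_register value address mask read_values bus_width logger → Pre_node_to_register value address mask read_values bus_width logger → Spec_node_to_register value address mask read_values bus_width logger (node_to_register value address mask read_values bus_width logger)

-- ===== LEMMAS AND PROOFS =====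

-- Nat bit facts
theorem pv_and_add_ldiff (a b : Nat) : (a &&& b) + Nat.ldiff a b = a := by
  induction a using Nat.strong_induction_on generalizing b with
  | _ a ih =>
    rcases Nat.eq_zero_or_pos a with ha | ha
    · subst ha
      show Nat.bitwise and 0 b + Nat.bitwise (fun a b => a && !b) 0 b = 0
      simp [Nat.bitwise_zero_left]
    rcases Nat.eq_zero_or_pos b with hb | hb
    · subst hb
      show Nat.bitwise and a 0 + Nat.bitwise (fun a b => a && !b) a 0 = a
      simp [Nat.bitwise_zero_right]
    have h1 : a &&& b = Nat.bit (Nat.bodd a && Nat.bodd b) (a / 2 &&& b / 2) :=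
      Nat.bitwise_of_ne_zero (by omega) (by omega)
    have h2 : Nat.ldiff a b = Nat.bit (Nat.bodd a && !Nat.bodd b) (Nat.ldiff (a/2) (b/2)) :=
      Nat.bitwise_of_ne_zero (by omega) (by omega)
    have ih' := ih (a / 2) (by omega) (b / 2)
    have h := Nat.mod_two_of_bodd a
    rw [h1, h2]
    simp only [Nat.bit, Bool.cond_eq_ite]
    cases hb' : Nat.bodd a <;> cases hc : Nat.bodd b <;> simp [hb'] at h ⊢ <;> omega

theorem pv_ldiff_shift (M n k : Nat) : (Nat.ldiff (M <<< k) n) >>> k = Nat.ldiff M (n >>> k) := by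
  apply Nat.eq_of_testBit_eq
  intro i
  simp [Nat.testBit_shiftRight, Nat.testBit_ldiff, Nat.testBit_shiftLeft]

theorem pv_and_shift (n M k : Nat) : (n &&& (M <<< k)) >>> k = (n >>> k) &&& M := by
  apply Nat.eq_of_testBit_eq
  intro i
  simp [Nat.testBit_shiftRight, Nat.testBit_and, Nat.testBit_shiftLeft]

-- the bit identity behind the two per-word formulas: (a & (M << k)) >> k = (a >> k) & M
theorem pv_keyShift (a : Int) (M k : Nat) :
    (PySem.Int.band a ((M : Int) <<< k)) >>> k = PySem.Int.band (a >>> k) (M : Int) := by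
  cases a with
  | ofNat n =>
    rw [show ((M:Int) <<< k) = ((M <<< k : Nat) : Int) from rfl,
        show (Int.ofNat n) = ((n:Nat):Int) from rfl,
        PySem.Int.band_natCast,
        show (((n &&& (M <<< k) : Nat)):Int) >>> k = (((n &&& (M <<< k)) >>> k : Nat) : Int) from rfl,
        show ((n:Int)) >>> k = ((n >>> k : Nat) : Int) from rfl,
        PySem.Int.band_natCast, pv_and_shift]
  | negSucc n =>
    have hb : ∀ (m x : Nat), PySem.Int.band (Int.negSucc x) (m : Int) = ((Nat.ldiff m x : Nat) : Int) := by
      intro m x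
      have hlt : ¬ (0:Int) ≤ Int.negSucc x := of_decide_eq_false rfl
      simp [PySem.Int.band, hlt]
      have := pv_and_add_ldiff m x
      omega
    rw [show ((M:Int) <<< k) = ((M <<< k : Nat) : Int) from rfl, hb,
        show (((Nat.ldiff (M <<< k) n : Nat)):Int) >>> k = (((Nat.ldiff (M <<< k) n) >>> k : Nat) : Int) from rfl,
        show (Int.negSucc n) >>> k = Int.negSucc (n >>> k) from rfl, hb, pv_ldiff_shift]

-- shared abbreviation for the list-level argument: total width of a suffix
def pvSumW (ts : List (Int × Int × Int)) : Nat := (ts.map (fun t => PySem.Int.bitCount t.2.1)).sum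

-- the common per-word value (B's formulation: mask the already-shifted value)
def pvElem (value bus_mask : Int) (t : Int × Int × Int) (off : Nat) : Int :=
  PySem.Int.bor
    ((PySem.Int.band (value >>> off) (((1:Int) <<< PySem.Int.bitCount t.2.1) - 1)) <<< (pyLsb t.2.1).toNat)
    (PySem.Int.band t.2.2 (bus_mask - t.2.1))

-- A's per-word value (as A computes it) equals B's, by the bit identity pv_keyShift
theorem pv_elemA_eq (value bus_mask : Int) (t : Int × Int × Int) (off : Nat) :
    PySem.Int.bor
      (((PySem.Int.band value ((((1:Int) <<< PySem.Int.bitCount t.2.1) - 1) <<< off)) >>> off) <<< (pyLsb t.2.1).toNat)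
      (PySem.Int.band t.2.2 (bus_mask - t.2.1)) = pvElem value bus_mask t off := by
  have hM : ((1:Int) <<< PySem.Int.bitCount t.2.1) - 1 = ((2 ^ PySem.Int.bitCount t.2.1 - 1 : Nat) : Int) := by
    rw [show ((1:Int) <<< PySem.Int.bitCount t.2.1) = ((1 <<< PySem.Int.bitCount t.2.1 : Nat) : Int) from rfl]
    simp [Nat.shiftLeft_eq]
  rw [pvElem, hM, pv_keyShift]

-- the output, built front-to-back: element j is offset by the sum of the widths after it
def pvBuild (value bus_mask : Int) (s : Nat) : List (Int × Int × Int) → List Int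
  | [] => []
  | t :: ts => pvElem value bus_mask t (s + pvSumW ts) :: pvBuild value bus_mask s ts

-- A's accumulator, built back-to-front (the order A appends in)
def pvBuildRevA (value bus_mask : Int) (s : Nat) : List (Int × Int × Int) → List Int
  | [] => []
  | t :: ts => pvBuildRevA value bus_mask s ts ++
      [PySem.Int.bor
        (((PySem.Int.band value ((((1:Int) <<< PySem.Int.bitCount t.2.1) - 1) <<< (s + pvSumW ts))) >>> (s + pvSumW ts)) <<< (pyLsb t.2.1).toNat)
        (PySem.Int.band t.2.2 (bus_mask - t.2.1))]

-- A's fold over the reversed triples, characterised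
theorem pv_foldA (value bus_mask : Int) (ts : List (Int × Int × Int)) (s : Nat) (acc : List Int) :
    ts.reverse.foldl (fun (st : Nat × List Int) (t : Int × Int × Int) =>
      let word_width := PySem.Int.bitCount t.2.1
      let node_word_mask := (((1:Int) <<< word_width) - 1) <<< st.1
      let node_word_value := (PySem.Int.band value node_word_mask) >>> st.1
      let lsb_pos := pyLsb t.2.1
      let bus_word_value := node_word_value <<< lsb_pos.toNat
      let word_to_keep := PySem.Int.band t.2.2 (bus_mask - t.2.1)
      (st.1 + word_width, st.2 ++ [PySem.Int.bor bus_word_value word_to_keep])) (s, acc)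
    = (s + pvSumW ts, acc ++ pvBuildRevA value bus_mask s ts) := by
  induction ts generalizing acc with
  | nil => simp [pvSumW, pvBuildRevA]
  | cons t ts ih =>
    rw [List.reverse_cons, List.foldl_append, ih]
    simp only [List.foldl_cons, List.foldl_nil, pvBuildRevA, pvSumW, List.map_cons, List.sum_cons,
      Prod.mk.injEq, List.append_assoc]
    exact ⟨by omega, by simp⟩

-- reversing A's accumulator gives the front-to-back list, with A's formula rewritten to B's
theorem pv_buildRevA_reverse (value bus_mask : Int) (s : Nat) (ts : List (Int × Int × Int)) :
    (pvBuildRevA value bus_mask s ts).reverse = pvBuild value bus_mask s ts := by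
  induction ts with
  | nil => rfl
  | cons t ts ih =>
    rw [pvBuildRevA, List.reverse_append, ih, pvBuild]
    simp [pv_elemA_eq]

-- total width distributes over append
theorem pvSumW_append (xs ys : List (Int × Int × Int)) :
    pvSumW (xs ++ ys) = pvSumW xs + pvSumW ys := by
  simp [pvSumW]

-- pvBuild splits over append: the left part is offset by the right part's total width
theorem pvBuild_append (value bus_mask : Int) (s : Nat) (xs ys : List (Int × Int × Int)) :
    pvBuild value bus_mask s (xs ++ ys)
      = pvBuild value bus_mask (s + pvSumW ys) xs ++ pvBuild value bus_mask s ys := by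
  induction xs with
  | nil => rfl
  | cons x xs ih =>
    simp only [List.cons_append, pvBuild, ih, pvSumW_append]
    rw [show s + (pvSumW xs + pvSumW ys) = s + pvSumW ys + pvSumW xs from by omega]

-- B's divide-and-conquer recursion, characterised against pvBuild
theorem pv_go (value bus_mask : Int) : ∀ (n : Nat) (ts : List (Int × Int × Int)), ts.length = n → ∀ (s : Nat),
    ntrGo bus_mask ts (value >>> s) = (pvBuild value bus_mask s ts, value >>> (s + pvSumW ts)) := by
  intro n
  induction n using Nat.strong_induction_on with
  | _ n ih =>
    intro ts hlen s
    match ts with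
    | [] => simp [ntrGo, pvBuild, pvSumW]
    | [t] =>
      simp only [ntrGo, pvBuild, pvSumW, pvElem, List.map_cons, List.map_nil, List.sum_cons,
        List.sum_nil, Nat.add_zero]
      rw [Prod.mk.injEq]
      exact ⟨rfl, (Int.shiftRight_add value s (PySem.Int.bitCount t.2.1)).symm⟩
    | t1 :: t2 :: rest =>
      have hlen2 : (t1 :: t2 :: rest).length = n := hlen
      have hn : 2 ≤ n := by simp at hlen2; omega
      have hdrop : ((t1 :: t2 :: rest).drop (n / 2)).length < n := by
        simp [List.length_drop, hlen2]; omega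
      have htake : ((t1 :: t2 :: rest).take (n / 2)).length < n := by
        simp [List.length_take, hlen2]; omega
      have e1 := ih _ hdrop ((t1 :: t2 :: rest).drop (n / 2)) rfl s
      have e2 := ih _ htake ((t1 :: t2 :: rest).take (n / 2)) rfl (s + pvSumW ((t1 :: t2 :: rest).drop (n / 2)))
      rw [ntrGo]
      simp only [hlen2, e1, e2]
      rw [Prod.mk.injEq]
      constructor
      · rw [show pvBuild value bus_mask s (t1 :: t2 :: rest)
            = pvBuild value bus_mask s (((t1 :: t2 :: rest).take (n / 2)) ++ ((t1 :: t2 :: rest).drop (n / 2)))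
            from by rw [List.take_append_drop]]
        rw [pvBuild_append]
      · rw [show pvSumW (t1 :: t2 :: rest)
            = pvSumW ((t1 :: t2 :: rest).take (n / 2)) + pvSumW ((t1 :: t2 :: rest).drop (n / 2))
            from by rw [← pvSumW_append, List.take_append_drop]]
        congr 1
        omega

theorem pv_main (value : Int) (address mask read_values : List Int) (bus_width : Int) (logger : Option Int) :
    node_to_register value address mask read_values bus_width logger
      = node_to_register_alt value address mask read_values bus_width logger := by
  unfold node_to_register node_to_register_alt
  simp only []
  rw [pv_foldA value (((1:Int) <<< bus_width.toNat) - 1) (List.zip address (List.zip mask read_values)) 0 []]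
  simp only [List.nil_append]
  rw [pv_buildRevA_reverse]
  have h := pv_go value (((1:Int) <<< bus_width.toNat) - 1)
      (List.zip address (List.zip mask read_values)).length
      (List.zip address (List.zip mask read_values)) rfl 0
  rw [show value >>> (0:Nat) = value from by simp] at h
  rw [h]

-- ===== VERDICT (by name: the statement is the Claim_ definition above) =====
theorem node_to_register_spec : Claim_equal_node_to_register := by
  intro value address mask read_values bus_width logger _ _
  unfold Spec_node_to_register
  exact pv_main value address mask read_values bus_width logger
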